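-- pv_equiv track=rewrite | github.com/sanj004/AI-resume-analyzer | src/parser.py | get_resume_sections
-- ===== SOURCE A (Python) =====
-- def get_resume_sections(text):
--     """
--     Takes raw resume text and tries to identify key sections.
--     """
--     sections = {
--         "education": "",
--         "experience": "",
--         "skills": "",
--         "projects": ""
--     }
--
--     # Common section headers to look for
--     keywords = {
--         "education": ["education", "academic"],
--         "experience": ["experience", "work history", "employment"],
--         "skills": ["skills", "technical skills", "technologies"],
--         "projects": ["projects", "personal projects"]
--     }
--
--     lines = text.lower().split("\n")
--     current_section = None
--
--     for line in lines:
--         # Check if this line is a section header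
--         for section, triggers in keywords.items():
--             if any(trigger in line for trigger in triggers):
--                 current_section = section
--                 break
--
--         # Add line to current section
--         if current_section:
--             sections[current_section] += line + "\n"
--
--     return sections
-- ===== SOURCE B (Python) =====
-- def get_resume_sections(text):
--     """
--     Takes raw resume text and tries to identify key sections.
--     Two-pass: first group the lines into chunks (one chunk per header line,
--     lines before the first header are dropped), then aggregate the chunks
--     per section.
--     """
--     keywords = {
--         "education": ["education", "academic"],
--         "experience": ["experience", "work history", "employment"],
--         "skills": ["skills", "technical skills", "technologies"],
--         "projects": ["projects", "personal projects"]
--     }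
--
--     # flattened trigger -> section table, in dict order (so the first
--     # matching section wins, like the original's break)
--     trigger_table = [(t, s) for s, ts in keywords.items() for t in ts]
--
--     def section_of(line):
--         return next((s for t, s in trigger_table if t in line), None)
--
--     def seg(chunk):
--         return "".join(l + "\n" for l in chunk)
--
--     lines = text.lower().split("\n")
--
--     # Pass 1: boundaries — one chunk per header line, holding the header
--     # line and every following non-header line.
--     chunks = []
--     for line in lines:
--         s = section_of(line)
--         if s is not None:
--             chunks.append((s, [line]))
--         elif chunks:
--             chunks[-1][1].append(line)
--
--     # Pass 2: aggregate per section.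
--     sections = {"education": "", "experience": "", "skills": "", "projects": ""}
--     for s, chunk in chunks:
--         sections[s] += seg(chunk)
--     return sections
-- ===== Notes on version B (the rewrite author's own statement) =====
-- stated objective: alternative
-- what changed: Replaces A's single stateful pass (a current-section register updated per line while the dict is mutated) by a two-pass boundary decomposition: first group lines into chunks at header lines (dropping pre-header lines), then aggregate each chunk's joined text into its section.
import Mathlib
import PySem

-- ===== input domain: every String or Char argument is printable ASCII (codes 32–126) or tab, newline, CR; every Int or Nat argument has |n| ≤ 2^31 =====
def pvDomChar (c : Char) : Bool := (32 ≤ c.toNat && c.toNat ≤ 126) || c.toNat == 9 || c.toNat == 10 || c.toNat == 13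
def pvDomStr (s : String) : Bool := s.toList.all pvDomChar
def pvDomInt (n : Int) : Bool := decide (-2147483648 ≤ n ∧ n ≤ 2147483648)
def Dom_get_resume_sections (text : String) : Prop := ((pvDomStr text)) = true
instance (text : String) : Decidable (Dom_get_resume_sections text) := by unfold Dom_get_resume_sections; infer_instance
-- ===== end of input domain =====

-- B replaces A's stateful single pass by a two-pass boundary decomposition (chunk at
-- header lines, then aggregate per section); same return value, objective: alternative.

-- shared keyword table (the literal dict both Pythons contain)
def pvKeywords : List (String × List String) :=
  [("education", ["education", "academic"]),
   ("experience", ["experience", "work history", "employment"]),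
   ("skills", ["skills", "technical skills", "technologies"]),
   ("projects", ["projects", "personal projects"])]

-- ===== PORT A =====
-- A's inner 'for section, triggers in keywords.items(): if any(...): current = section; break'
def pvHeaderA (line : String) : Option String :=
  (pvKeywords.find? (fun p => p.2.any (fun t => PySem.Str.isIn t line))).map (fun p => p.1)

-- A's loop body: state = (sections, current_section)
def pvStepA (st : PySem.Dict String String × Option String) (line : String) :
    PySem.Dict String String × Option String :=
  let cur := match pvHeaderA line with
    | some s => some s
    | none => st.2
  match cur with
  | some s => (st.1.modify s "" (fun v => v ++ (line ++ "\n")), cur)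
  | none => (st.1, cur)

def get_resume_sections (text : String) : List (String × String) :=
  let lines := (PySem.Str.split? (PySem.Str.lower text) "\n").getD []
  let st := lines.foldl pvStepA
    (PySem.Dict.mk [("education", ""), ("experience", ""), ("skills", ""), ("projects", "")], none)
  st.1.items

-- ===== PORT B =====
-- Source B's flattened trigger -> section table '[(t, s) for s, ts in keywords.items() for t in ts]'
def pvTriggerTable : List (String × String) :=
  pvKeywords.flatMap (fun p => p.2.map (fun t => (t, p.1)))

-- Source B's helper section_of(line) = next((s for t, s in trigger_table if t in line), None)
def pvSectionOf (line : String) : Option String :=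
  (pvTriggerTable.find? (fun q => PySem.Str.isIn q.1 line)).map (fun q => q.2)

-- Source B's helper seg(chunk) = "".join(l + "\n" for l in chunk)
def pvSeg (chunk : List String) : String :=
  PySem.Str.join "" (chunk.map (fun l => l ++ "\n"))

-- Source B's first loop: append a new chunk at a header line, else extend the last chunk
def pvStepB (chunks : List (String × List String)) (line : String) :
    List (String × List String) :=
  match pvSectionOf line with
  | some s => chunks ++ [(s, [line])]
  | none =>
    match chunks.getLast? with
    | some last => chunks.dropLast ++ [(last.1, last.2 ++ [line])]
    | none => chunks

def get_resume_sections_alt (text : String) : List (String × String) :=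
  let lines := (PySem.Str.split? (PySem.Str.lower text) "\n").getD []
  let chunks := lines.foldl pvStepB []
  let sections := chunks.foldl
    (fun (d : PySem.Dict String String) c => d.modify c.1 "" (fun v => v ++ pvSeg c.2))
    (PySem.Dict.mk [("education", ""), ("experience", ""), ("skills", ""), ("projects", "")])
  sections.items

-- ===== PRECONDITION & SPEC =====
def Spec_get_resume_sections (text : String) (out : List (String × String)) : Prop := out = get_resume_sections_alt text
instance (text : String) (out : List (String × String)) : Decidable (Spec_get_resume_sections text out) := by unfold Spec_get_resume_sections; infer_instance

-- ===== CLAIM (what is proved, stated in full; the proofs are below) =====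
def Claim_equal_get_resume_sections : Prop := ∀ (text : String), Dom_get_resume_sections text → Spec_get_resume_sections text (get_resume_sections text)

-- ===== LEMMAS AND PROOFS =====

-- the two header resolvers agree: first-match over the flattened trigger table is
-- first section (in table order) with a matching trigger
lemma pvFlatFind (kw : List (String × List String)) (line : String) :
    ((kw.flatMap (fun p => p.2.map (fun t => (t, p.1)))).find?
        (fun q => PySem.Str.isIn q.1 line)).map (fun q => q.2)
      = (kw.find? (fun p => p.2.any (fun t => PySem.Str.isIn t line))).map (fun p => p.1) := by
  induction kw with
  | nil => rfl
  | cons p rest ih =>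
    have hcomp : ((fun q : String × String => PySem.Str.isIn q.1 line) ∘ (fun t : String => (t, p.1)))
        = (fun t => PySem.Str.isIn t line) := rfl
    rw [List.flatMap_cons, List.find?_append, List.find?_map, hcomp]
    cases hany : p.2.any (fun t => PySem.Str.isIn t line) with
    | true =>
      obtain ⟨t, ht⟩ := Option.isSome_iff_exists.mp (by rw [List.isSome_find?]; exact hany)
      rw [ht, List.find?_cons_of_pos (p := fun r : String × List String => r.2.any fun t => PySem.Str.isIn t line) (a := p) (l := rest) hany]
      rfl
    | false =>
      have hnone : p.2.find? (fun t => PySem.Str.isIn t line) = none := by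
        rw [List.find?_eq_none]
        intro t htmem
        exact (List.any_eq_false.mp hany) t htmem
      rw [hnone, List.find?_cons_of_neg (p := fun r : String × List String => r.2.any fun t => PySem.Str.isIn t line) (a := p) (l := rest) (by simpa using hany)]
      simpa using ih

lemma pvSection_eq (line : String) : pvSectionOf line = pvHeaderA line := by
  simpa [pvSectionOf, pvTriggerTable, pvHeaderA] using pvFlatFind pvKeywords line

-- B's second pass as a function of the starting dict
def pvApply (d : PySem.Dict String String) (cs : List (String × List String)) :
    PySem.Dict String String :=
  cs.foldl (fun (d : PySem.Dict String String) c => d.modify c.1 "" (fun v => v ++ pvSeg c.2)) d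

lemma pvIntercalateNil : ∀ (xss : List (List Char)), List.intercalate ([] : List Char) xss = xss.flatten
  | [] => rfl
  | [x] => by simp [List.intercalate]
  | x :: y :: t => by
    have := pvIntercalateNil (y :: t)
    simp [List.intercalate, List.intersperse] at *
    simpa using this

lemma pvSeg_flatten (ls : List String) :
    pvSeg ls = String.ofList ((ls.map (fun l => l.toList ++ ['\n'])).flatten) := by
  simp only [pvSeg, PySem.Str.join, PySem.Chars.join, List.map_map,
    show "".toList = ([] : List Char) from rfl, pvIntercalateNil]
  exact congrArg String.ofList
    (congrArg List.flatten (List.map_congr_left fun l _ => by simp [Function.comp]))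

lemma pvSeg_singleton (l : String) : pvSeg [l] = l ++ "\n" := by
  simp [pvSeg_flatten]

lemma pvSeg_append_singleton (ls : List String) (l : String) :
    pvSeg (ls ++ [l]) = pvSeg ls ++ (l ++ "\n") := by
  simp [pvSeg_flatten, String.ofList_append]

lemma pvModify_modify (d : PySem.Dict String String) (k x y : String) :
    (d.modify k "" (fun v => v ++ x)).modify k "" (fun v => v ++ y)
      = d.modify k "" (fun v => v ++ (x ++ y)) := by
  simp [PySem.Dict.modify, PySem.Dict.getD_insert_self, PySem.Dict.insert_insert_self,
    String.append_assoc]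

lemma pvApply_append_singleton (d : PySem.Dict String String) (cs : List (String × List String))
    (c : String × List String) :
    pvApply d (cs ++ [c]) = (pvApply d cs).modify c.1 "" (fun v => v ++ pvSeg c.2) := by
  simp [pvApply]

lemma pvMain (lines : List String) :
    ∀ (chunks : List (String × List String)) (d0 : PySem.Dict String String),
      (lines.foldl pvStepA (pvApply d0 chunks, chunks.getLast?.map Prod.fst)).1
        = pvApply d0 (lines.foldl pvStepB chunks) := by
  induction lines with
  | nil => intro chunks d0; rfl
  | cons l t ih =>
    intro chunks d0
    show (t.foldl pvStepA (pvStepA (pvApply d0 chunks, chunks.getLast?.map Prod.fst) l)).1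
        = pvApply d0 (t.foldl pvStepB (pvStepB chunks l))
    cases h : pvHeaderA l with
    | some s =>
      have hb : pvStepB chunks l = chunks ++ [(s, [l])] := by
        simp [pvStepB, pvSection_eq, h]
      have ha : pvStepA (pvApply d0 chunks, chunks.getLast?.map Prod.fst) l
          = (pvApply d0 (chunks ++ [(s, [l])]), (chunks ++ [(s, [l])]).getLast?.map Prod.fst) := by
        simp [pvStepA, h, pvApply_append_singleton, pvSeg_singleton]
      rw [hb, ha, ih]
    | none =>
      cases hlast : chunks.getLast? with
      | none =>
        have hnil : chunks = [] := List.getLast?_eq_none_iff.mp hlast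
        subst hnil
        have hb : pvStepB [] l = [] := by
          simp [pvStepB, pvSection_eq, h]
        simpa [pvStepA, pvStepB, h, pvSection_eq] using ih [] d0
      | some last =>
        obtain ⟨ys, rfl⟩ := List.getLast?_eq_some_iff.mp hlast
        have hb : pvStepB (ys ++ [last]) l = ys ++ [(last.1, last.2 ++ [l])] := by
          simp [pvStepB, pvSection_eq, h]
        have ha : pvStepA (pvApply d0 (ys ++ [last]), Option.map Prod.fst (some last)) l
            = (pvApply d0 (ys ++ [(last.1, last.2 ++ [l])]),
               ((ys ++ [(last.1, last.2 ++ [l])]).getLast?).map Prod.fst) := by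
          simp [pvStepA, h, pvApply_append_singleton, pvSeg_append_singleton, pvModify_modify]
        rw [hb, ha, ih]

-- ===== VERDICT (by name: the statement is the Claim_ definition above) =====
theorem get_resume_sections_spec : Claim_equal_get_resume_sections := by
  intro text _
  unfold Spec_get_resume_sections get_resume_sections get_resume_sections_alt
  have h := pvMain ((PySem.Str.split? (PySem.Str.lower text) "\n").getD []) []
    (PySem.Dict.mk [("education", ""), ("experience", ""), ("skills", ""), ("projects", "")])
  simpa [pvApply] using congrArg PySem.Dict.items h
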